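-- pv_equiv track=rewrite | github.com/DeniskaMazur/SnapGatherer | github/parse.py | get_plugins
-- ===== SOURCE A (Python) =====
-- def get_plugins(snapcraft_file, plugins=None):
--     """
--     Parse plugins from a snapcraft file
--     :param snapcraft_file: string, your snapcraft file
--     :param plugins: dict, in case yo want update existing dict
--     :return: dict, {plugin: count}
--     """
--     if plugins == None:
--         plugins = {}
--
--     for line in snapcraft_file.split("\n"):
--         line = line.strip()
--         if line.startswith('plugin: '):
--             plugin = line[8:]
--             if plugin in plugins:
--                 plugins[plugin] = plugins[plugin] + 1
--             else:
--                 plugins[plugin] = 1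
--     return plugins
-- ===== SOURCE B (Python) =====
-- def get_plugins(snapcraft_file, plugins=None):
--     """Two-phase rewrite: extract plugin names, dedup to first occurrences, then tabulate."""
--     if plugins is None:
--         plugins = {}
--     names = [line.strip()[8:] for line in snapcraft_file.split("\n")
--              if line.strip().startswith('plugin: ')]
--     seen = []
--     for name in names:
--         if name not in seen:
--             seen.append(name)
--     for name in seen:
--         plugins[name] = plugins.get(name, 0) + names.count(name)
--     return plugins
-- ===== Notes on version B (the rewrite author's own statement) =====
-- stated objective: alternative
-- what changed: Replaces the single scan-and-increment loop with a two-phase structure: first extract all plugin names by filtering/slicing the lines, then dedup to first occurrences and write each distinct name once with plugins.get(name,0) + names.count(name).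
import Mathlib
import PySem

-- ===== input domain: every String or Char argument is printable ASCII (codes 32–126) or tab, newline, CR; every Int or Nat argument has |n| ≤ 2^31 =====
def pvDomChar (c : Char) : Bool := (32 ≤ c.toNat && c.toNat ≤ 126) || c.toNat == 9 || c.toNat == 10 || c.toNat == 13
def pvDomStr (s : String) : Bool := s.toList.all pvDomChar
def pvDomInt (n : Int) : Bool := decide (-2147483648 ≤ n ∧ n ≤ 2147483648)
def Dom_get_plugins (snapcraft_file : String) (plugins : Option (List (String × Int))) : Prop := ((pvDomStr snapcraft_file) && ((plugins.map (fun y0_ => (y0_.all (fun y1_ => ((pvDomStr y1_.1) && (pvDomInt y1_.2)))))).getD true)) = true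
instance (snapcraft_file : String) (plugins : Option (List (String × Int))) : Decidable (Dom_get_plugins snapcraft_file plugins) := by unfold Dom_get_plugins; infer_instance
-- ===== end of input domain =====

-- B replaces A's inline scan-and-increment with a two-phase extract/dedup/tabulate structure (return value; both mutate the passed dict identically).


-- ===== PORT A =====
def get_plugins (snapcraft_file : String) (plugins : Option (List (String × Int))) : List (String × Int) :=
  let d0 : PySem.Dict String Int := PySem.Dict.mk (plugins.getD [])
  (((PySem.Str.split? snapcraft_file "\n").getD []).foldl (fun d line =>
      let line := PySem.Str.strip line
      if PySem.Str.startswith line "plugin: " then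
        let plugin := PySem.Str.slice line (some 8) none
        if d.contains plugin then d.insert plugin (d.getD plugin 0 + 1)
        else d.insert plugin 1
      else d) d0).items

-- ===== PORT B =====
def get_plugins_alt (snapcraft_file : String) (plugins : Option (List (String × Int))) : List (String × Int) :=
  let d0 : PySem.Dict String Int := PySem.Dict.mk (plugins.getD [])
  let names := (((PySem.Str.split? snapcraft_file "\n").getD []).filter
      (fun line => PySem.Str.startswith (PySem.Str.strip line) "plugin: ")).map
      (fun line => PySem.Str.slice (PySem.Str.strip line) (some 8) none)
  let seen := names.foldl (fun s name => if s.contains name then s else s ++ [name]) []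
  (seen.foldl (fun d name => d.insert name (d.getD name 0 + (names.count name : Int))) d0).items

-- ===== PRECONDITION & SPEC =====
def Spec_get_plugins (snapcraft_file : String) (plugins : Option (List (String × Int))) (out : List (String × Int)) : Prop := out = get_plugins_alt snapcraft_file plugins
instance (snapcraft_file : String) (plugins : Option (List (String × Int))) (out : List (String × Int)) : Decidable (Spec_get_plugins snapcraft_file plugins out) := by unfold Spec_get_plugins; infer_instance

-- ===== CLAIM (what is proved, stated in full; the proofs are below) =====
def Claim_equal_get_plugins : Prop := ∀ (snapcraft_file : String) (plugins : Option (List (String × Int))), Dom_get_plugins snapcraft_file plugins → Spec_get_plugins snapcraft_file plugins (get_plugins snapcraft_file plugins)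

-- ===== LEMMAS AND PROOFS =====

-- a filtered-and-mapped loop body equals a fold over the comprehension's list
theorem pv_foldl_filter_map {α β γ : Type} (p : α → Bool) (f : α → β) (g : γ → β → γ) :
    ∀ (l : List α) (c : γ),
      l.foldl (fun c x => if p x then g c (f x) else c) c
        = (((l.filter p).map f).foldl g c) := by
  intro l
  induction l with
  | nil => intro c; rfl
  | cons x xs ih =>
    intro c
    by_cases h : p x = true
    · simp [h, ih]
    · simp [h, ih]

-- A's branch is a single insert with getD
theorem pv_stepA_eq (d : PySem.Dict String Int) (n : String) :
    (if d.contains n then d.insert n (d.getD n 0 + 1) else d.insert n 1)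
      = d.insert n (d.getD n 0 + 1) := by
  by_cases h : d.contains n = true
  · simp [h]
  · have h' : d.contains n = false := by simpa using h
    rw [if_neg h, PySem.Dict.getD_of_not_contains d 0 h']
    norm_num

-- the dedup loop builds PySem.Set.ofList
theorem pv_seen_eq (names : List String) :
    ∀ s : List String,
      names.foldl (fun (s : List String) name => if s.contains name then s else s ++ [name]) s
        = PySem.Set.update s names := by
  induction names with
  | nil => intro s; simp [PySem.Set.update]
  | cons n rest ih =>
    intro s
    rw [PySem.Set.update_cons, ← ih, PySem.Set.add_eq_ite]
    by_cases h : n ∈ s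
    · simp [h]
    · have : s.contains n = false := by
        simpa using (fun hc => h (List.contains_iff_mem.mp hc))
      simp [h]

-- inserting at a present key commutes with inserting at another key
theorem pv_insert_comm (d : PySem.Dict String Int) (k m : String) (v w : Int)
    (hk : d.contains k = true) (hne : m ≠ k) :
    (d.insert k v).insert m w = (d.insert m w).insert k v := by
  have hmk : (m == k) = false := by simpa using hne
  have hkm : (k == m) = false := by simpa using (Ne.symm hne)
  apply PySem.Dict.ext
  have c2 : (d.insert m w).contains k = true := by
    simp [PySem.Dict.contains_insert, hk]
  by_cases hm : d.contains m = true
  · have c1 : (d.insert k v).contains m = true := by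
      simp [PySem.Dict.contains_insert, hm]
    rw [PySem.Dict.items_insert_of_contains _ _ c1,
        PySem.Dict.items_insert_of_contains _ _ hk,
        PySem.Dict.items_insert_of_contains _ _ c2,
        PySem.Dict.items_insert_of_contains _ _ hm]
    rw [List.map_map, List.map_map]
    apply List.map_congr_left
    intro p _
    by_cases h1 : p.1 = k
    · simp [Function.comp, h1, hkm]
    · by_cases h2 : p.1 = m
      · simp [Function.comp, h2, hmk]
      · simp [Function.comp, h1, h2]
  · have hm' : d.contains m = false := by simpa using hm
    have c1 : (d.insert k v).contains m = false := by
      simp [PySem.Dict.contains_insert, hm', hmk]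
    rw [PySem.Dict.items_insert_of_not_contains _ _ c1,
        PySem.Dict.items_insert_of_contains _ _ hk,
        PySem.Dict.items_insert_of_contains _ _ c2,
        PySem.Dict.items_insert_of_not_contains _ _ hm']
    rw [List.map_append]
    simp [hne]

-- fold over keys all different from k preserves getD k
theorem pv_getD_fold (c : String → Int) (k : String) :
    ∀ (l : List String) (d : PySem.Dict String Int), (∀ m ∈ l, m ≠ k) →
      (l.foldl (fun d n => d.insert n (d.getD n 0 + c n)) d).getD k 0 = d.getD k 0 := by
  intro l
  induction l with
  | nil => intro d _; rfl
  | cons m rest ih =>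
    intro d h
    have hm : m ≠ k := h m (by simp)
    rw [List.foldl_cons, ih _ (fun x hx => h x (by simp [hx])),
        PySem.Dict.getD_insert_of_ne _ _ _ (Ne.symm hm)]

-- an insert at a present key commutes out of a fold over other keys
theorem pv_commute_fold (c : String → Int) (k : String) (v : Int) :
    ∀ (l : List String) (d : PySem.Dict String Int), d.contains k = true → (∀ m ∈ l, m ≠ k) →
      l.foldl (fun d n => d.insert n (d.getD n 0 + c n)) (d.insert k v)
        = (l.foldl (fun d n => d.insert n (d.getD n 0 + c n)) d).insert k v := by
  intro l
  induction l with
  | nil => intro d _ _; rfl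
  | cons m rest ih =>
    intro d hk h
    have hm : m ≠ k := h m (by simp)
    rw [List.foldl_cons, List.foldl_cons,
        PySem.Dict.getD_insert_of_ne _ _ _ hm,
        pv_insert_comm d k m v _ hk hm,
        ih _ (by simp [PySem.Dict.contains_insert, hk]) (fun x hx => h x (by simp [hx]))]

-- MAIN: the one-pass counting fold equals the dedup-then-tabulate fold
theorem pv_main (ns : List String) :
    ∀ d : PySem.Dict String Int,
      ns.foldl (fun d n => d.insert n (d.getD n 0 + 1)) d
        = (PySem.Set.ofList ns).foldl
            (fun d n => d.insert n (d.getD n 0 + (ns.count n : Int))) d := by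
  induction ns with
  | nil => intro d; simp [PySem.Set.ofList_nil]
  | cons n rest ih =>
    intro d
    rw [List.foldl_cons, ih, PySem.Set.ofList_cons, List.foldl_cons]
    have hcnt : (((n :: rest).count n : Nat) : Int) = (rest.count n : Int) + 1 := by
      rw [List.count_cons_self]; push_cast; ring
    rw [hcnt]
    have hcongr :
        (PySem.Set.discard (PySem.Set.ofList rest) n).foldl
            (fun d m => d.insert m (d.getD m 0 + ((n :: rest).count m : Int)))
            (d.insert n (d.getD n 0 + ((rest.count n : Int) + 1)))
          = (PySem.Set.discard (PySem.Set.ofList rest) n).foldl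
            (fun d m => d.insert m (d.getD m 0 + (rest.count m : Int)))
            (d.insert n (d.getD n 0 + ((rest.count n : Int) + 1))) := by
      apply PySem.List.foldl_congr_mem
      intro d' m hm
      have hmn : m ≠ n := ((PySem.Set.mem_discard _ _ _).mp hm).2
      rw [List.count_cons_of_ne (Ne.symm hmn)]
    rw [hcongr]
    by_cases h : n ∈ rest
    · have hmem : n ∈ PySem.Set.ofList rest := (PySem.Set.mem_ofList _ _).mpr h
      obtain ⟨l1, l2, hsplit⟩ := List.append_of_mem hmem
      have hnd : (PySem.Set.ofList rest).Nodup := PySem.Set.nodup_ofList rest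
      rw [hsplit] at hnd
      have hn1 : n ∉ l1 := by
        intro hx
        exact (List.disjoint_of_nodup_append hnd) hx (by simp)
      have hn2 : n ∉ l2 := by
        have := (List.nodup_append.mp hnd).2.1
        simpa using (List.nodup_cons.mp this).1
      have hl1 : ∀ m ∈ l1, m ≠ n := fun m hm he => hn1 (he ▸ hm)
      have hl2 : ∀ m ∈ l2, m ≠ n := fun m hm he => hn2 (he ▸ hm)
      have hdisc : PySem.Set.discard (PySem.Set.ofList rest) n = l1 ++ l2 := by
        have hfid : ∀ (l : List String), (∀ m ∈ l, m ≠ n) →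
            l.filter (fun y => !(y == n)) = l := fun l h =>
          List.filter_eq_self.mpr (fun m hm => by simp [h m hm])
        rw [hsplit]
        simp [PySem.Set.discard, List.filter_append,
              hfid l1 hl1, hfid l2 hl2]
      rw [hdisc, hsplit, List.foldl_append, List.foldl_append, List.foldl_cons]
      set start := d.insert n (d.getD n 0 + 1) with hstart
      have hstartc : start.contains n = true := by
        simp [hstart, PySem.Dict.contains_insert_self]
      rw [pv_getD_fold _ n l1 start hl1]
      have hsg : start.getD n 0 = d.getD n 0 + 1 := by
        simp [hstart, PySem.Dict.getD_insert_self]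
      rw [hsg]
      have hv : d.getD n 0 + 1 + (rest.count n : Int) = d.getD n 0 + ((rest.count n : Int) + 1) := by ring
      rw [hv]
      rw [← pv_commute_fold (fun m => (rest.count m : Int)) n _ l1 start hstartc hl1]
      rw [PySem.Dict.insert_insert_self]
    · have hdisc : PySem.Set.discard (PySem.Set.ofList rest) n = PySem.Set.ofList rest := by
        apply List.filter_eq_self.mpr
        intro m hm
        have : m ≠ n := fun he => h ((PySem.Set.mem_ofList _ _).mp (he ▸ hm))
        simp [this]
      have hc0 : (rest.count n : Int) = 0 := by
        simp [List.count_eq_zero.mpr h]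
      rw [hdisc, hc0]
      norm_num

-- ===== VERDICT (by name: the statement is the Claim_ definition above) =====
theorem get_plugins_spec : Claim_equal_get_plugins := by
  intro snapcraft_file plugins _
  unfold Spec_get_plugins get_plugins get_plugins_alt
  have key : ∀ (lines : List String) (d0 : PySem.Dict String Int),
      lines.foldl (fun d line =>
          let line := PySem.Str.strip line
          if PySem.Str.startswith line "plugin: " then
            let plugin := PySem.Str.slice line (some 8) none
            if d.contains plugin then d.insert plugin (d.getD plugin 0 + 1)
            else d.insert plugin 1
          else d) d0
        = (let names := (lines.filter
              (fun line => PySem.Str.startswith (PySem.Str.strip line) "plugin: ")).map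
              (fun line => PySem.Str.slice (PySem.Str.strip line) (some 8) none)
           let seen := names.foldl (fun s name => if s.contains name then s else s ++ [name]) []
           seen.foldl (fun d name => d.insert name (d.getD name 0 + (names.count name : Int))) d0) := by
    intro lines d0
    have hbody : ∀ (d : PySem.Dict String Int), ∀ line ∈ lines,
        (let l := PySem.Str.strip line
         if PySem.Str.startswith l "plugin: " then
           let plugin := PySem.Str.slice l (some 8) none
           if d.contains plugin then d.insert plugin (d.getD plugin 0 + 1)
           else d.insert plugin 1
         else d)
        = (if (fun line => PySem.Str.startswith (PySem.Str.strip line) "plugin: ") line then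
             (fun (d : PySem.Dict String Int) (n : String) => d.insert n (d.getD n 0 + 1)) d
               ((fun line => PySem.Str.slice (PySem.Str.strip line) (some 8) none) line)
           else d) := by
      intro d line _
      show (if PySem.Str.startswith (PySem.Str.strip line) "plugin: " then
              if d.contains (PySem.Str.slice (PySem.Str.strip line) (some 8) none) then
                d.insert (PySem.Str.slice (PySem.Str.strip line) (some 8) none)
                  (d.getD (PySem.Str.slice (PySem.Str.strip line) (some 8) none) 0 + 1)
              else d.insert (PySem.Str.slice (PySem.Str.strip line) (some 8) none) 1
            else d)
          = (if PySem.Str.startswith (PySem.Str.strip line) "plugin: " then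
              d.insert (PySem.Str.slice (PySem.Str.strip line) (some 8) none)
                (d.getD (PySem.Str.slice (PySem.Str.strip line) (some 8) none) 0 + 1)
            else d)
      by_cases hpl : PySem.Str.startswith (PySem.Str.strip line) "plugin: " = true
      · rw [if_pos hpl, if_pos hpl]
        exact pv_stepA_eq d _
      · rw [if_neg hpl, if_neg hpl]
    rw [PySem.List.foldl_congr_mem lines _ _ d0 hbody,
        pv_foldl_filter_map
          (fun line => PySem.Str.startswith (PySem.Str.strip line) "plugin: ")
          (fun line => PySem.Str.slice (PySem.Str.strip line) (some 8) none)
          (fun (d : PySem.Dict String Int) (n : String) => d.insert n (d.getD n 0 + 1)) lines d0]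
    show _ = List.foldl _ d0
        (((lines.filter (fun line => PySem.Str.startswith (PySem.Str.strip line) "plugin: ")).map
            (fun line => PySem.Str.slice (PySem.Str.strip line) (some 8) none)).foldl
          (fun s name => if s.contains name then s else s ++ [name]) [])
    rw [pv_seen_eq _ [], PySem.Set.update_nil_left, pv_main]
  exact congrArg PySem.Dict.items (key ((PySem.Str.split? snapcraft_file "\n").getD [])
    (PySem.Dict.mk (plugins.getD [])))
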